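-- pv_equiv track=rewrite | github.com/fpolica91/IK_resources | educative/python/countVowelSubstrings.py | countAtMostVowels
-- ===== SOURCE A (Python) =====
-- def countAtMostVowels(word: str, k: int) -> int:
--     count = 0
--     j = 0
--     vowels = "aeiou"
--     charmap = {}
--
--     for i in range(len(word)):
--         char = word[i]
--         if char not in vowels:
--             charmap = {}
--             j = i + 1
--             continue
--
--         if word[i] not in charmap:
--             charmap[word[i]] = 0
--         charmap[word[i]] += 1
--
--         while len(charmap) > k:
--             leftchar = word[j]
--             charmap[leftchar] -= 1
--             if charmap[leftchar] == 0:
--                 del charmap[leftchar]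
--             j += 1
--
--         count += i - j + 1
--
--     return count
-- ===== SOURCE B (Python) =====
-- def countAtMostVowels(word: str, k: int) -> int:
--     # Brute force: for each start, scan forward while chars are vowels and
--     # the set of distinct vowels stays within k; every step counts one substring.
--     total = 0
--     n = len(word)
--     for i in range(n):
--         seen = set()
--         for j in range(i, n):
--             ch = word[j]
--             if ch not in "aeiou":
--                 break
--             seen.add(ch)
--             if len(seen) > k:
--                 break
--             total += 1
--     return total
-- ===== Notes on version B (the rewrite author's own statement) =====
-- stated objective: simpler
-- what changed: Replaces A's amortized sliding window (a dict of per-vowel counts with a left pointer that shrinks the window in place) by a plain brute-force double loop that restarts an empty vowel set at every start index and breaks on a non-vowel or when the distinct count exceeds k.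
import Mathlib
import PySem

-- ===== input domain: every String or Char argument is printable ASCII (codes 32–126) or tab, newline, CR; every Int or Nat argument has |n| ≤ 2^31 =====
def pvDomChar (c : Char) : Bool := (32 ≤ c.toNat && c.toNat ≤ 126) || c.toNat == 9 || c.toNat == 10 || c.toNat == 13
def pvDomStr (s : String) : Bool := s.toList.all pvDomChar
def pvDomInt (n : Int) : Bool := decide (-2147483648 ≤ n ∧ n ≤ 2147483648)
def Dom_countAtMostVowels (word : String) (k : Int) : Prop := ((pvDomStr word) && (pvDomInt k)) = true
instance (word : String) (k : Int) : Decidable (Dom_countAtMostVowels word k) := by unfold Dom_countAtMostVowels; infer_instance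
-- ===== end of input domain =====

-- B replaces A's sliding window (dict of counts + left pointer) by a plain brute-force
-- double loop restarting a vowel set at every start index; objective: simpler, not faster.


-- shared one-liner: membership test `c in "aeiou"` (a single char against the vowel string)
def isVowel (c : Char) : Bool := (['a', 'e', 'i', 'o', 'u'] : List Char).contains c

-- ===== PORT A =====
-- the inner `while len(charmap) > k` loop; fuel-bounded recursion — inside Pre_ the loop
-- makes at most word.length steps, so fuel word.length + 1 is never exhausted.
-- `word[j]` is PySem.List.pyGet? (none = IndexError, outside Pre_); `charmap[leftchar] -= 1`
-- is Dict.modify (a KeyError of Python is possible only outside Pre_, where charmap has the key).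
def shrinkA (word : List Char) (k : Int) : Nat → Int → PySem.Dict Char Int → Int × PySem.Dict Char Int
  | 0, j, m => (j, m)
  | fuel + 1, j, m =>
    if (m.size : Int) > k then
      match PySem.List.pyGet? word j with
      | none => (j, m)          -- Python raises IndexError here; unreachable inside Pre_
      | some leftchar =>
        let m' := m.modify leftchar 0 (· - 1)
        if m'.getD leftchar 0 == 0 then shrinkA word k fuel (j + 1) (m'.erase leftchar)
        else shrinkA word k fuel (j + 1) m'
    else (j, m)

-- the `for i in range(len(word))` loop over enumerate, state (count, j, charmap)
def loopA (word : List Char) (k : Int) : List (Int × Char) → Int → Int → PySem.Dict Char Int → Int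
  | [], count, _, _ => count
  | (i, c) :: rest, count, j, m =>
    if isVowel c = false then loopA word k rest count (i + 1) PySem.Dict.empty
    else
      let m1 := if m.contains c then m else m.insert c 0
      let m2 := m1.modify c 0 (· + 1)
      let r := shrinkA word k (word.length + 1) j m2
      loopA word k rest (count + (i - r.1 + 1)) r.1 r.2

def countAtMostVowels (word : String) (k : Int) : Int :=
  loopA word.toList k (PySem.List.enumerate word.toList 0) 0 0 PySem.Dict.empty

-- ===== PORT B =====
-- inner scan from a fixed start: break on a non-vowel or when the seen-set exceeds k
def innerB (k : Int) : List Char → PySem.Set Char → Int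
  | [], _ => 0
  | c :: rest, seen =>
    if isVowel c = false then 0
    else
      let seen' := PySem.Set.add seen c
      if PySem.Set.len seen' > k then 0
      else 1 + innerB k rest seen'

-- outer loop over all start positions (suffixes)
def outerB (k : Int) : List Char → Int
  | [] => 0
  | c :: rest => innerB k (c :: rest) PySem.Set.empty + outerB k rest

def countAtMostVowels_alt (word : String) (k : Int) : Int := outerB k word.toList

-- ===== PRECONDITION & SPEC =====
-- Pre_ excludes exactly the inputs where A raises: with k < 0 and a vowel present, A's
-- window-shrinking loop runs past the window and hits an IndexError or KeyError.
def Pre_countAtMostVowels (word : String) (k : Int) : Prop :=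
  0 ≤ k ∨ ∀ c ∈ word.toList, c ∉ (['a', 'e', 'i', 'o', 'u'] : List Char)
instance (word : String) (k : Int) : Decidable (Pre_countAtMostVowels word k) := by
  unfold Pre_countAtMostVowels; infer_instance
def pvWitness_countAtMostVowels : String × Int := ("aeixa", 1)

def Spec_countAtMostVowels (word : String) (k : Int) (out : Int) : Prop := out = countAtMostVowels_alt word k
instance (word : String) (k : Int) (out : Int) : Decidable (Spec_countAtMostVowels word k out) := by
  unfold Spec_countAtMostVowels; infer_instance

-- ===== CLAIM (what is proved, stated in full; the proofs are below) =====
def Claim_equal_countAtMostVowels : Prop := ∀ (word : String) (k : Int), Dom_countAtMostVowels word k → Pre_countAtMostVowels word k → Spec_countAtMostVowels word k (countAtMostVowels word k)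

-- ===== LEMMAS AND PROOFS =====

-- the window word[s:e] (half-open, Nat indices)
def win (l : List Char) (s e : Nat) : List Char := (l.drop s).take (e - s)

-- "word[s:e] is a counted substring": all vowels, at most k distinct
def Pb (l : List Char) (k : Int) (s e : Nat) : Bool :=
  (win l s e).all isVowel && decide (((PySem.Set.ofList (win l s e)).length : Int) ≤ k)

-- number of counted substrings ending at index e (inclusive)
def gcnt (l : List Char) (k : Int) (e : Nat) : Nat :=
  ((Finset.range (e + 1)).filter (fun s => Pb l k s (e + 1) = true)).card

-- number of counted substrings starting at index s
def fcnt (l : List Char) (k : Int) (s : Nat) : Nat :=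
  ((Finset.Ico s l.length).filter (fun e => Pb l k s (e + 1) = true)).card

-- charmap invariant: nodup keys, and lookups are exactly the positive counts of the window
def DInv (m : PySem.Dict Char Int) (w : List Char) : Prop :=
  m.keys.Nodup ∧ ∀ c : Char, m.get? c = if 0 < w.count c then some ((w.count c : Int)) else none

theorem win_nil (l : List Char) (s e : Nat) (h : e ≤ s) : win l s e = [] := by
  simp [win, Nat.sub_eq_zero_of_le h]

theorem win_snoc (l : List Char) (s e : Nat) (hse : s ≤ e) (he : e < l.length) :
    win l s (e + 1) = win l s e ++ [l[e]] := by
  have h1 : e + 1 - s = (e - s) + 1 := by omega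
  have h2 : (l.drop s)[e - s]? = some l[e] := by
    rw [List.getElem?_drop]
    have h3 : s + (e - s) = e := by omega
    rw [h3, List.getElem?_eq_getElem he]
  unfold win
  rw [h1, List.take_add_one, h2]
  rfl

theorem win_cons (l : List Char) (s e : Nat) (hse : s < e) (hs : s < l.length) :
    win l s e = l[s] :: win l (s + 1) e := by
  unfold win
  rw [List.drop_eq_getElem_cons hs]
  have h1 : e - s = (e - (s + 1)) + 1 := by omega
  rw [h1, List.take_succ_cons]

theorem win_take (l : List Char) (s e e' : Nat) (h1 : s ≤ e) (h2 : e ≤ e') :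
    win l s e = (win l s e').take (e - s) := by
  unfold win
  rw [List.take_take]
  congr 1
  omega

theorem win_drop (l : List Char) (s s' e : Nat) (h1 : s ≤ s') :
    win l s' e = (win l s e).drop (s' - s) := by
  unfold win
  have h2 : s + (s' - s) = s' := by omega
  have h3 : e - s - (s' - s) = e - s' := by omega
  rw [List.drop_take, List.drop_drop, h2, h3]

theorem distinct_subset {xs ys : List Char} (h : xs ⊆ ys) :
    (PySem.Set.ofList xs).length ≤ (PySem.Set.ofList ys).length := by
  refine (List.subperm_of_subset (PySem.Set.nodup_ofList xs) ?_).length_le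
  intro a ha
  exact (PySem.Set.mem_ofList ys a).2 (h ((PySem.Set.mem_ofList xs a).1 ha))

theorem P_mono_len (l : List Char) (k : Int) (s e e' : Nat) (h1 : s ≤ e) (h2 : e ≤ e')
    (hP : Pb l k s e' = true) : Pb l k s e = true := by
  simp only [Pb, Bool.and_eq_true, List.all_eq_true, decide_eq_true_eq] at hP ⊢
  have hsub : win l s e ⊆ win l s e' := by
    rw [win_take l s e e' h1 h2]
    exact List.take_subset _ _
  exact ⟨fun x hx => hP.1 x (hsub hx), le_trans (by exact_mod_cast distinct_subset hsub) hP.2⟩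

theorem P_mono_start (l : List Char) (k : Int) (s s' e : Nat) (h1 : s ≤ s')
    (hP : Pb l k s e = true) : Pb l k s' e = true := by
  simp only [Pb, Bool.and_eq_true, List.all_eq_true, decide_eq_true_eq] at hP ⊢
  have hsub : win l s' e ⊆ win l s e := by
    rw [win_drop l s s' e h1]
    exact List.drop_subset _ _
  exact ⟨fun x hx => hP.1 x (hsub hx), le_trans (by exact_mod_cast distinct_subset hsub) hP.2⟩

-- erase lemmas (not in the PySem book)
theorem find?_filter_ne {ν : Type} (items : List (Char × ν)) (c c' : Char) (h : c' ≠ c) :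
    (items.filter (fun p => !(p.1 == c))).find? (fun p => p.1 == c') = items.find? (fun p => p.1 == c') := by
  induction items with
  | nil => rfl
  | cons x t ih =>
    by_cases hx : x.1 = c
    · have h1 : (!(x.1 == c)) = false := by simp [hx]
      have h2 : (x.1 == c') = false := by
        rw [hx]
        exact beq_eq_false_iff_ne.2 (Ne.symm h)
      rw [List.filter_cons, h1]
      simp only [Bool.false_eq_true, if_false]
      rw [List.find?_cons_of_neg (by simp [h2]), ih]
    · have h1 : (!(x.1 == c)) = true := by simp [hx]
      rw [List.filter_cons, h1, if_pos rfl]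
      by_cases hx' : (x.1 == c') = true
      · simp [List.find?, hx']
      · rw [List.find?_cons_of_neg (by simp [hx']), List.find?_cons_of_neg (by simp [hx']), ih]

theorem get?_erase_self {ν : Type} (d : PySem.Dict Char ν) (c : Char) :
    (d.erase c).get? c = none := by
  have h : (List.find? (fun p => p.1 == c) (List.filter (fun p => !(p.1 == c)) d.items)) = none := by
    rw [List.find?_eq_none]
    intro x hx
    have hm := List.of_mem_filter hx
    simp only [Bool.not_eq_eq_eq_not, Bool.not_true] at hm
    simp [hm]
  simp [PySem.Dict.get?, PySem.Dict.erase, h]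

theorem get?_erase_of_ne {ν : Type} (d : PySem.Dict Char ν) (c c' : Char) (h : c' ≠ c) :
    (d.erase c).get? c' = d.get? c' := by
  simp only [PySem.Dict.get?, PySem.Dict.erase]
  rw [find?_filter_ne d.items c c' h]

theorem nodup_keys_erase {ν : Type} (d : PySem.Dict Char ν) (c : Char) (h : d.keys.Nodup) :
    (d.erase c).keys.Nodup := by
  have hs : (d.items.filter (fun p => !(p.1 == c))).Sublist d.items := List.filter_sublist
  exact List.Nodup.sublist (List.Sublist.map (fun x : Char × ν => x.1) hs) h

theorem DInv_empty : DInv PySem.Dict.empty [] := by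
  refine ⟨PySem.Dict.nodup_keys_empty, fun c => ?_⟩
  rw [PySem.Dict.get?_empty]
  simp

theorem DInv_size {m : PySem.Dict Char Int} {w : List Char} (h : DInv m w) :
    m.size = (PySem.Set.ofList w).length := by
  obtain ⟨hnd, hget⟩ := h
  have hmem : ∀ c, c ∈ m.keys ↔ c ∈ PySem.Set.ofList w := by
    intro c
    rw [PySem.Set.mem_ofList]
    constructor
    · intro hc
      by_contra hcw
      have h0 : w.count c = 0 := List.count_eq_zero.2 hcw
      have hn : m.get? c = none := by rw [hget]; simp [h0]
      exact (PySem.Dict.get?_eq_none_iff_not_mem_keys m c).1 hn hc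
    · intro hcw
      have hpos : 0 < w.count c := List.count_pos_iff.2 hcw
      by_contra hck
      have hn := (PySem.Dict.get?_eq_none_iff_not_mem_keys m c).2 hck
      rw [hget] at hn
      simp [hpos] at hn
  have hperm : m.keys.Perm (PySem.Set.ofList w) :=
    (List.perm_ext_iff_of_nodup hnd (PySem.Set.nodup_ofList w)).2 hmem
  have hsz : m.size = m.keys.length := by
    simp [PySem.Dict.size, PySem.Dict.keys]
  rw [hsz, hperm.length_eq]

theorem DInv_push {m : PySem.Dict Char Int} {w : List Char} (h : DInv m w) (c : Char) :
    DInv ((if m.contains c then m else m.insert c 0).modify c 0 (· + 1)) (w ++ [c]) := by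
  obtain ⟨hnd, hget⟩ := h
  have hnd1 : (if m.contains c then m else m.insert c 0).keys.Nodup := by
    split
    · exact hnd
    · exact PySem.Dict.nodup_keys_insert m c 0 hnd
  have hget1 : ∀ c' : Char, c' ≠ c → (if m.contains c then m else m.insert c 0).get? c' = m.get? c' := by
    intro c' hcc
    split
    · rfl
    · rw [PySem.Dict.get?_insert, if_neg hcc]
  have hgd1 : (if m.contains c then m else m.insert c 0).getD c 0 = (w.count c : Int) := by
    by_cases hc : m.contains c = true
    · simp only [hc, if_true]
      have hpos : 0 < w.count c := by
        by_contra hle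
        have h0 : w.count c = 0 := by omega
        have hnone : m.get? c = none := by rw [hget]; simp [h0]
        rw [PySem.Dict.get?_eq_none_iff_contains] at hnone
        rw [hc] at hnone
        cases hnone
      rw [PySem.Dict.getD_eq_get?_getD, hget]
      simp [hpos]
    · have hzero : w.count c = 0 := by
        by_contra hpos'
        have hpos : 0 < w.count c := by omega
        have hsome : m.get? c = some ((w.count c : Int)) := by rw [hget]; simp [hpos]
        have h2 : m.contains c = true := by
          rw [PySem.Dict.contains_eq_isSome_get?, hsome]
          rfl
        exact hc h2
      have hc' : m.contains c = false := by
        revert hc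
        cases m.contains c <;> simp
      have hif : (if m.contains c = true then m else m.insert c 0) = m.insert c 0 := by
        rw [hc']
        simp
      rw [hif, PySem.Dict.getD_eq_get?_getD, PySem.Dict.get?_insert, if_pos rfl]
      simp [hzero]
  have heq : (if m.contains c then m else m.insert c 0).modify c 0 (· + 1)
      = (if m.contains c then m else m.insert c 0).insert c ((w.count c : Int) + 1) := by
    show (if m.contains c then m else m.insert c 0).insert c
        ((if m.contains c then m else m.insert c 0).getD c 0 + 1) = _
    rw [hgd1]
  rw [heq]
  refine ⟨PySem.Dict.nodup_keys_insert _ c _ hnd1, fun c' => ?_⟩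
  rw [PySem.Dict.get?_insert]
  by_cases hcc : c' = c
  · subst hcc
    have hcnt : (w ++ [c']).count c' = w.count c' + 1 := by simp
    rw [if_pos rfl, hcnt]
    have hp : 0 < w.count c' + 1 := by omega
    simp only [hp, if_true]
    push_cast
    ring_nf
  · rw [if_neg hcc, hget1 c' hcc, hget]
    have hcnt : (w ++ [c]).count c' = w.count c' := by
      simp [List.count_append, Ne.symm hcc]
    rw [hcnt]

theorem DInv_pop {m : PySem.Dict Char Int} {c : Char} {w : List Char} (h : DInv m (c :: w)) :
    ((m.modify c 0 (· - 1)).getD c 0 = 0 → DInv ((m.modify c 0 (· - 1)).erase c) w) ∧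
    ((m.modify c 0 (· - 1)).getD c 0 ≠ 0 → DInv (m.modify c 0 (· - 1)) w) := by
  obtain ⟨hnd, hget⟩ := h
  have hcnt : (c :: w).count c = w.count c + 1 := by simp
  have hgd : m.getD c 0 = (w.count c : Int) + 1 := by
    rw [PySem.Dict.getD_eq_get?_getD, hget, hcnt]
    have hp : 0 < w.count c + 1 := by omega
    rw [if_pos hp, Option.getD_some]
    push_cast
    ring
  have hm' : m.modify c 0 (· - 1) = m.insert c ((w.count c : Int)) := by
    show m.insert c (m.getD c 0 - 1) = _
    rw [hgd]
    congr 1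
    ring
  have hgd' : (m.modify c 0 (· - 1)).getD c 0 = (w.count c : Int) := by
    rw [hm', PySem.Dict.getD_eq_get?_getD, PySem.Dict.get?_insert]
    simp
  have hother : ∀ c' : Char, c' ≠ c →
      (m.modify c 0 (· - 1)).get? c' = (if 0 < w.count c' then some ((w.count c' : Int)) else none) := by
    intro c' hcc
    rw [hm', PySem.Dict.get?_insert, if_neg hcc, hget]
    have hc2 : (c :: w).count c' = w.count c' := by simp [Ne.symm hcc]
    rw [hc2]
  constructor
  · intro h0
    rw [hgd'] at h0
    have hw0 : w.count c = 0 := by exact_mod_cast h0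
    refine ⟨nodup_keys_erase _ c ?_, fun c' => ?_⟩
    · rw [hm']
      exact PySem.Dict.nodup_keys_insert m c _ hnd
    · by_cases hcc : c' = c
      · subst hcc
        rw [get?_erase_self]
        simp [hw0]
      · rw [get?_erase_of_ne _ c c' hcc, hother c' hcc]
  · intro h0
    rw [hgd'] at h0
    have hw0 : w.count c ≠ 0 := by exact_mod_cast h0
    refine ⟨?_, fun c' => ?_⟩
    · rw [hm']
      exact PySem.Dict.nodup_keys_insert m c _ hnd
    · by_cases hcc : c' = c
      · subst hcc
        rw [hm', PySem.Dict.get?_insert, if_pos rfl]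
        have hp : 0 < w.count c' := Nat.pos_of_ne_zero hw0
        simp [hp]
      · rw [hother c' hcc]

theorem shrink_spec (l : List Char) (k : Int) (hk : 0 ≤ k) (e : Nat) (he : e ≤ l.length) :
    ∀ fuel j m, j ≤ e → e - j ≤ fuel → DInv m (win l j e) → (win l j e).all isVowel = true →
    ∃ (j'' : Nat) (m'' : PySem.Dict Char Int), shrinkA l k fuel (j : Int) m = ((j'' : Int), m'') ∧
      j ≤ j'' ∧ j'' ≤ e ∧ DInv m'' (win l j'' e) ∧
      ((PySem.Set.ofList (win l j'' e)).length : Int) ≤ k ∧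
      (∀ s, j ≤ s → s < j'' → k < ((PySem.Set.ofList (win l s e)).length : Int)) := by
  intro fuel
  induction fuel with
  | zero =>
    intro j m hje hfe hDI hall
    have hje' : j = e := by omega
    subst hje'
    refine ⟨j, m, rfl, le_refl _, le_refl _, hDI, ?_, fun s hs1 hs2 => absurd hs2 (by omega)⟩
    rw [win_nil l j j le_rfl]
    simpa using hk
  | succ fuel ih =>
    intro j m hje hfe hDI hall
    by_cases hsz : (m.size : Int) > k
    · have hdist : k < ((PySem.Set.ofList (win l j e)).length : Int) := by
        have hsz' := DInv_size hDI
        rw [hsz'] at hsz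
        exact hsz
      have hjlt : j < e := by
        by_contra hge
        rw [win_nil l j e (by omega)] at hdist
        simp at hdist
        omega
      have hjl : j < l.length := by omega
      have hpg : PySem.List.pyGet? l (j : Int) = some l[j] := by
        rw [PySem.List.pyGet?_natCast, List.getElem?_eq_getElem hjl]
      have hwin := win_cons l j e hjlt hjl
      have hDIc : DInv m (l[j] :: win l (j + 1) e) := by rw [← hwin]; exact hDI
      have hpop := DInv_pop hDIc
      have halltail : (win l (j + 1) e).all isVowel = true := by
        rw [hwin] at hall
        simp only [List.all_cons, Bool.and_eq_true] at hall
        exact hall.2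
      have hcast : (j : Int) + 1 = ((j + 1 : Nat) : Int) := by push_cast; ring
      rw [shrinkA, if_pos hsz, hpg]
      simp only []
      by_cases h0 : (m.modify l[j] 0 (· - 1)).getD l[j] 0 = 0
      · rw [if_pos (by rw [beq_iff_eq]; exact h0), hcast]
        obtain ⟨j'', m'', heq, h1, h2, h3, h4, h5⟩ :=
          ih (j + 1) ((m.modify l[j] 0 (· - 1)).erase l[j]) (by omega) (by omega) (hpop.1 h0) halltail
        refine ⟨j'', m'', heq, by omega, h2, h3, h4, ?_⟩
        intro s hs1 hs2
        by_cases hsj : s = j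
        · subst hsj
          exact hdist
        · exact h5 s (by omega) hs2
      · rw [if_neg (by rw [beq_iff_eq]; exact h0), hcast]
        obtain ⟨j'', m'', heq, h1, h2, h3, h4, h5⟩ :=
          ih (j + 1) (m.modify l[j] 0 (· - 1)) (by omega) (by omega) (hpop.2 h0) halltail
        refine ⟨j'', m'', heq, by omega, h2, h3, h4, ?_⟩
        intro s hs1 hs2
        by_cases hsj : s = j
        · subst hsj
          exact hdist
        · exact h5 s (by omega) hs2
    · rw [not_lt] at hsz
      have hdist : ((PySem.Set.ofList (win l j e)).length : Int) ≤ k := by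
        have hsz' := DInv_size hDI
        rw [← hsz']
        exact hsz
      refine ⟨j, m, ?_, le_refl _, hje, hDI, hdist, fun s hs1 hs2 => absurd hs2 (by omega)⟩
      rw [shrinkA, if_neg (not_lt.2 hsz)]

theorem loopA_novowel (l : List Char) (k : Int) :
    ∀ (items : List (Int × Char)), (∀ p ∈ items, isVowel p.2 = false) →
    ∀ count j m, loopA l k items count j m = count := by
  intro items
  induction items with
  | nil => intro _ count j m; simp [loopA]
  | cons p rest ih =>
    intro h count j m
    obtain ⟨i, c⟩ := p
    have hc : isVowel c = false := h (i, c) (List.mem_cons_self)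
    simp only [loopA, hc]
    exact ih (fun q hq => h q (List.mem_cons_of_mem _ hq)) _ _ _

theorem loopA_spec (l : List Char) (k : Int) (hk : 0 ≤ k) :
    ∀ fuel i j : Nat, l.length - i ≤ fuel → j ≤ i → i ≤ l.length →
    ∀ (count : Int) m, DInv m (win l j i) → (win l j i).all isVowel = true →
    ((PySem.Set.ofList (win l j i)).length : Int) ≤ k →
    (∀ s, s < j → Pb l k s i = false) →
    loopA l k (PySem.List.enumerate (l.drop i) (i : Int)) count (j : Int) m =
      count + ∑ e ∈ Finset.Ico i l.length, (gcnt l k e : Int) := by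
  intro fuel
  induction fuel with
  | zero =>
    intro i j hfe hji hil count m hDI hall hdist hmin
    have hi : i = l.length := by omega
    subst hi
    rw [List.drop_length]
    simp [loopA, PySem.List.enumerate_nil]
  | succ fuel ih =>
    intro i j hfe hji hil count m hDI hall hdist hmin
    by_cases hi : i = l.length
    · subst hi
      rw [List.drop_length]
      simp [loopA, PySem.List.enumerate_nil]
    · have hil' : i < l.length := by omega
      rw [List.drop_eq_getElem_cons hil', PySem.List.enumerate_cons]
      have hcast : (i : Int) + 1 = ((i + 1 : Nat) : Int) := by push_cast; ring
      by_cases hvc : isVowel l[i] = true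
      · -- vowel step
        simp only [loopA]
        rw [if_neg (by simp [hvc])]
        have hwsnoc := win_snoc l j i hji hil'
        have hDI2 : DInv ((if m.contains l[i] then m else m.insert l[i] 0).modify l[i] 0 (· + 1))
            (win l j (i + 1)) := by
          rw [hwsnoc]
          exact DInv_push hDI l[i]
        have hall2 : (win l j (i + 1)).all isVowel = true := by
          rw [hwsnoc]
          simp [List.all_append, hvc]
          simpa using hall
        obtain ⟨j'', m'', heq, hjj, hje, hDI3, hdist3, hmin3⟩ :=
          shrink_spec l k hk (i + 1) (by omega) (l.length + 1) j _ (by omega) (by omega) hDI2 hall2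
        simp only [heq]
        have hall3 : (win l j'' (i + 1)).all isVowel = true := by
          rw [win_drop l j j'' (i + 1) hjj]
          simp only [List.all_eq_true] at hall2 ⊢
          intro x hx
          exact hall2 x (List.mem_of_mem_drop hx)
        have hP3 : Pb l k j'' (i + 1) = true := by
          simp [Pb, hall3, hdist3]
        have hmin4 : ∀ s, s < j'' → Pb l k s (i + 1) = false := by
          intro s hs
          by_cases hsj : s < j
          · by_contra hT
            have hT' : Pb l k s (i + 1) = true := by
              revert hT
              cases Pb l k s (i + 1) <;> simp
            have hT2 := P_mono_len l k s i (i + 1) (by omega) (by omega) hT'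
            rw [hmin s hsj] at hT2
            cases hT2
          · have hgt := hmin3 s (by omega) hs
            have hng : ¬ (((PySem.Set.ofList (win l s (i + 1))).length : Int) ≤ k) := by omega
            simp [Pb, hng]
        have hPall : ∀ s, j'' ≤ s → s < i + 1 → Pb l k s (i + 1) = true := by
          intro s h1 h2
          exact P_mono_start l k j'' s (i + 1) h1 hP3
        have hge : gcnt l k i = i + 1 - j'' := by
          unfold gcnt
          have hfeq : (Finset.range (i + 1)).filter (fun s => Pb l k s (i + 1) = true)
              = Finset.Ico j'' (i + 1) := by
            apply Finset.ext
            intro s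
            simp only [Finset.mem_filter, Finset.mem_range, Finset.mem_Ico]
            constructor
            · rintro ⟨h1, h2⟩
              refine ⟨?_, h1⟩
              by_contra hlt
              rw [hmin4 s (by omega)] at h2
              cases h2
            · rintro ⟨h1, h2⟩
              exact ⟨h2, hPall s h1 h2⟩
          rw [hfeq, Nat.card_Ico]
        rw [hcast]
        rw [ih (i + 1) j'' (by omega) (by omega) (by omega) (count + ((i : Int) - (j'' : Int) + 1))
          m'' hDI3 hall3 hdist3 hmin4]
        rw [Finset.sum_eq_sum_Ico_succ_bot hil', hge]
        have hc2 : ((i + 1 - j'' : Nat) : Int) = (i : Int) - (j'' : Int) + 1 := by omega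
        rw [hc2]
        ring
      · -- non-vowel step
        have hvc' : isVowel l[i] = false := by
          revert hvc
          cases isVowel l[i] <;> simp
        simp only [loopA]
        rw [if_pos hvc', hcast]
        have hPfalse : ∀ s, s < i + 1 → Pb l k s (i + 1) = false := by
          intro s hs
          have hsnoc := win_snoc l s i (by omega) hil'
          have haf : (win l s (i + 1)).all isVowel = false := by
            rw [hsnoc]
            simp [List.all_append, hvc']
          simp [Pb, haf]
        have hDI1 : DInv PySem.Dict.empty (win l (i + 1) (i + 1)) := by
          rw [win_nil l (i + 1) (i + 1) le_rfl]
          exact DInv_empty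
        have hall1 : (win l (i + 1) (i + 1)).all isVowel = true := by
          rw [win_nil l (i + 1) (i + 1) le_rfl]
          rfl
        have hdist1 : ((PySem.Set.ofList (win l (i + 1) (i + 1))).length : Int) ≤ k := by
          rw [win_nil l (i + 1) (i + 1) le_rfl]
          simpa using hk
        rw [ih (i + 1) (i + 1) (by omega) le_rfl (by omega) count PySem.Dict.empty hDI1 hall1
          hdist1 hPfalse]
        rw [Finset.sum_eq_sum_Ico_succ_bot hil']
        have hg0 : gcnt l k i = 0 := by
          unfold gcnt
          rw [Finset.card_eq_zero, Finset.filter_eq_empty_iff]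
          intro s hs
          rw [Finset.mem_range] at hs
          simp [hPfalse s hs]
        rw [hg0]
        ring

theorem innerB_spec (l : List Char) (k : Int) :
    ∀ fuel p s : Nat, l.length - p ≤ fuel → s ≤ p → p ≤ l.length →
    (win l s p).all isVowel = true →
    innerB k (l.drop p) (PySem.Set.ofList (win l s p)) =
      (((Finset.Ico p l.length).filter (fun e => Pb l k s (e + 1) = true)).card : Int) := by
  intro fuel
  induction fuel with
  | zero =>
    intro p s hfe hsp hpl hall
    have hp : p = l.length := by omega
    subst hp
    rw [List.drop_length]
    simp [innerB]
  | succ fuel ih =>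
    intro p s hfe hsp hpl hall
    by_cases hp : p = l.length
    · subst hp
      rw [List.drop_length]
      simp [innerB]
    · have hpl' : p < l.length := by omega
      rw [List.drop_eq_getElem_cons hpl']
      have hsnoc := win_snoc l s p hsp hpl'
      by_cases hvc : isVowel l[p] = true
      · have hset : PySem.Set.add (PySem.Set.ofList (win l s p)) l[p]
            = PySem.Set.ofList (win l s (p + 1)) := by
          rw [hsnoc, PySem.Set.ofList_append_singleton]
        have hall1 : (win l s (p + 1)).all isVowel = true := by
          rw [hsnoc]
          simp [List.all_append, hvc]
          simpa using hall
        simp only [innerB]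
        rw [if_neg (by simp [hvc])]
        simp only [hset]
        by_cases hlen : PySem.Set.len (PySem.Set.ofList (win l s (p + 1))) > k
        · rw [if_pos hlen]
          have hlen2 : k < ((PySem.Set.ofList (win l s (p + 1))).length : Int) := by
            simpa [PySem.Set.len] using hlen
          have hPfalse : ∀ e, p ≤ e → e < l.length → Pb l k s (e + 1) = false := by
            intro e h1 h2
            have hsub : win l s (p + 1) ⊆ win l s (e + 1) := by
              rw [win_take l s (p + 1) (e + 1) (by omega) (by omega)]
              exact List.take_subset _ _
            have hd := distinct_subset hsub
            have hng : ¬ (((PySem.Set.ofList (win l s (e + 1))).length : Int) ≤ k) := by omega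
            simp [Pb, hng]
          have hempty : (Finset.Ico p l.length).filter (fun e => Pb l k s (e + 1) = true) = ∅ := by
            rw [Finset.filter_eq_empty_iff]
            intro e he
            rw [Finset.mem_Ico] at he
            simp [hPfalse e he.1 he.2]
          rw [hempty]
          simp
        · rw [if_neg hlen]
          have hlen' : ((PySem.Set.ofList (win l s (p + 1))).length : Int) ≤ k := by
            simp only [PySem.Set.len] at hlen
            omega
          have hPtrue : Pb l k s (p + 1) = true := by
            simp [Pb, hall1, hlen']
          rw [ih (p + 1) s (by omega) (by omega) (by omega) hall1]
          have hsplit : (((Finset.Ico p l.length).filter (fun e => Pb l k s (e + 1) = true)).card)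
              = 1 + (((Finset.Ico (p + 1) l.length).filter (fun e => Pb l k s (e + 1) = true)).card) := by
            rw [Finset.card_filter, Finset.card_filter, Finset.sum_eq_sum_Ico_succ_bot hpl',
              if_pos hPtrue]
          rw [hsplit]
          push_cast
          ring
      · have hvc' : isVowel l[p] = false := by
          revert hvc
          cases isVowel l[p] <;> simp
        simp only [innerB]
        rw [if_pos hvc']
        have hPfalse : ∀ e, p ≤ e → e < l.length → Pb l k s (e + 1) = false := by
          intro e h1 h2
          have hsub : win l s (p + 1) ⊆ win l s (e + 1) := by
            rw [win_take l s (p + 1) (e + 1) (by omega) (by omega)]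
            exact List.take_subset _ _
          have hmem : l[p] ∈ win l s (e + 1) := by
            apply hsub
            rw [hsnoc]
            simp
          have haf : (win l s (e + 1)).all isVowel = false := by
            by_contra hT
            have hT' : (win l s (e + 1)).all isVowel = true := by
              revert hT
              cases (win l s (e + 1)).all isVowel <;> simp
            rw [List.all_eq_true] at hT'
            have := hT' l[p] hmem
            rw [hvc'] at this
            cases this
          simp [Pb, haf]
        have hempty : (Finset.Ico p l.length).filter (fun e => Pb l k s (e + 1) = true) = ∅ := by
          rw [Finset.filter_eq_empty_iff]
          intro e he
          rw [Finset.mem_Ico] at he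
          simp [hPfalse e he.1 he.2]
        rw [hempty]
        simp

theorem outerB_novowel (k : Int) :
    ∀ (xs : List Char), (∀ c ∈ xs, isVowel c = false) → outerB k xs = 0 := by
  intro xs
  induction xs with
  | nil => intro _; simp [outerB]
  | cons c rest ih =>
    intro h
    have hc : isVowel c = false := h c (List.mem_cons_self)
    simp only [outerB, innerB, hc, if_pos]
    rw [ih (fun d hd => h d (List.mem_cons_of_mem _ hd))]
    simp

theorem outerB_spec (l : List Char) (k : Int) :
    ∀ fuel s : Nat, l.length - s ≤ fuel → s ≤ l.length →
    outerB k (l.drop s) = ∑ t ∈ Finset.Ico s l.length, (fcnt l k t : Int) := by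
  intro fuel
  induction fuel with
  | zero =>
    intro s hfe hsl
    have hs : s = l.length := by omega
    subst hs
    rw [List.drop_length]
    simp [outerB]
  | succ fuel ih =>
    intro s hfe hsl
    by_cases hs : s = l.length
    · subst hs
      rw [List.drop_length]
      simp [outerB]
    · have hsl' : s < l.length := by omega
      rw [List.drop_eq_getElem_cons hsl']
      simp only [outerB]
      rw [← List.drop_eq_getElem_cons hsl']
      have hse : (PySem.Set.empty : PySem.Set Char) = PySem.Set.ofList (win l s s) := by
        rw [win_nil l s s le_rfl]
        rfl
      rw [hse, innerB_spec l k l.length s s (by omega) le_rfl (by omega)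
        (by rw [win_nil l s s le_rfl]; rfl)]
      rw [ih (s + 1) (by omega) (by omega)]
      rw [Finset.sum_eq_sum_Ico_succ_bot hsl']
      rfl

theorem sum_swap_gf (l : List Char) (k : Int) :
    ∑ e ∈ Finset.range l.length, (gcnt l k e : Int)
      = ∑ s ∈ Finset.range l.length, (fcnt l k s : Int) := by
  have h1 : ∀ e ∈ Finset.range l.length,
      (gcnt l k e : Int) = ∑ s ∈ Finset.range l.length,
        (if s ≤ e ∧ Pb l k s (e + 1) = true then (1 : Int) else 0) := by
    intro e he
    rw [Finset.mem_range] at he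
    unfold gcnt
    have hfe : (Finset.range (e + 1)).filter (fun s => Pb l k s (e + 1) = true)
        = (Finset.range l.length).filter (fun s => s ≤ e ∧ Pb l k s (e + 1) = true) := by
      apply Finset.ext
      intro s
      simp only [Finset.mem_filter, Finset.mem_range]
      constructor
      · rintro ⟨ha, hb⟩
        exact ⟨by omega, by omega, hb⟩
      · rintro ⟨ha, hb, hc⟩
        exact ⟨by omega, hc⟩
    rw [hfe, Finset.card_filter]
    push_cast
    apply Finset.sum_congr rfl
    intro s _
    split_ifs <;> simp
  have h2 : ∀ s ∈ Finset.range l.length,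
      (fcnt l k s : Int) = ∑ e ∈ Finset.range l.length,
        (if s ≤ e ∧ Pb l k s (e + 1) = true then (1 : Int) else 0) := by
    intro s hs
    rw [Finset.mem_range] at hs
    unfold fcnt
    have hfe : (Finset.Ico s l.length).filter (fun e => Pb l k s (e + 1) = true)
        = (Finset.range l.length).filter (fun e => s ≤ e ∧ Pb l k s (e + 1) = true) := by
      apply Finset.ext
      intro e
      simp only [Finset.mem_filter, Finset.mem_range, Finset.mem_Ico]
      constructor
      · rintro ⟨⟨ha, hb⟩, hc⟩
        exact ⟨hb, ha, hc⟩
      · rintro ⟨ha, hb, hc⟩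
        exact ⟨⟨hb, ha⟩, hc⟩
    rw [hfe, Finset.card_filter]
    push_cast
    apply Finset.sum_congr rfl
    intro e _
    split_ifs <;> simp
  rw [Finset.sum_congr rfl h1, Finset.sum_congr rfl h2]
  exact Finset.sum_comm

-- ===== VERDICT (by name: the statement is the Claim_ definition above) =====
theorem countAtMostVowels_spec : Claim_equal_countAtMostVowels := by
  unfold Claim_equal_countAtMostVowels
  intro word k _ hpre
  unfold Spec_countAtMostVowels
  rcases hpre with hk | hnov
  · unfold countAtMostVowels countAtMostVowels_alt
    have hA := loopA_spec word.toList k hk word.toList.length 0 0 (by omega) (by omega) (by omega)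
      0 PySem.Dict.empty
      (by rw [win_nil _ 0 0 le_rfl]; exact DInv_empty)
      (by rw [win_nil _ 0 0 le_rfl]; rfl)
      (by rw [win_nil _ 0 0 le_rfl]; simpa using hk)
      (by intro s hs; exact absurd hs (by omega))
    rw [List.drop_zero] at hA
    simp only [Nat.cast_zero] at hA
    rw [hA]
    have hB := outerB_spec word.toList k word.toList.length 0 (by omega) (by omega)
    rw [List.drop_zero] at hB
    rw [hB]
    rw [← Finset.range_eq_Ico, zero_add]
    exact sum_swap_gf word.toList k
  · have hA0 : countAtMostVowels word k = 0 := by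
      unfold countAtMostVowels
      apply loopA_novowel
      intro p hp
      rw [PySem.List.mem_enumerate_iff] at hp
      obtain ⟨n, hn, rfl⟩ := hp
      have hm := hnov word.toList[n] (List.getElem_mem hn)
      simp [isVowel, List.contains_eq_mem, hm]
    have hB0 : countAtMostVowels_alt word k = 0 := by
      unfold countAtMostVowels_alt
      apply outerB_novowel
      intro d hd
      have hm := hnov d hd
      simp [isVowel, List.contains_eq_mem, hm]
    rw [hA0, hB0]
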